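-- pv_equiv track=rewrite | github.com/devpedroolivier/news_curator_os | src/news_curator_os/search.py | _is_official_domain
-- ===== SOURCE A (Python) =====
-- OFFICIAL_DOMAINS = {
--     "gov.br",
--     "bcb.gov.br",
--     "fazenda.gov.br",
--     "planalto.gov.br",
--     "in.gov.br",
--     "ibge.gov.br",
--     "saude.gov.br",
--     "cvm.gov.br",
--     "camara.leg.br",
--     "senado.leg.br",
--     "tse.jus.br",
--     "stf.jus.br",
--     "who.int",
--     "whitehouse.gov",
--     "treasury.gov",
--     "sec.gov",
--     "federalreserve.gov",
--     "justice.gov",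
--     "cdc.gov",
--     "fda.gov",
--     "worldbank.org",
--     "imf.org",
--     "europa.eu",
--     "ec.europa.eu",
-- }
--
-- def _is_official_domain(domain: str) -> bool:
--     if not domain:
--         return False
--     if domain.endswith(".gov") or domain.endswith(".gov.br"):
--         return True
--     if domain.endswith(".jus.br") or domain.endswith(".leg.br") or domain.endswith(".mil.br"):
--         return True
--     return any(domain == candidate or domain.endswith(f".{candidate}") for candidate in OFFICIAL_DOMAINS)
-- ===== SOURCE B (Python) =====
-- OFFICIAL_DOMAINS = {
--     "gov.br",
--     "bcb.gov.br",
--     "fazenda.gov.br",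
--     "planalto.gov.br",
--     "in.gov.br",
--     "ibge.gov.br",
--     "saude.gov.br",
--     "cvm.gov.br",
--     "camara.leg.br",
--     "senado.leg.br",
--     "tse.jus.br",
--     "stf.jus.br",
--     "who.int",
--     "whitehouse.gov",
--     "treasury.gov",
--     "sec.gov",
--     "federalreserve.gov",
--     "justice.gov",
--     "cdc.gov",
--     "fda.gov",
--     "worldbank.org",
--     "imf.org",
--     "europa.eu",
--     "ec.europa.eu",
-- }
--
-- # suffixes that A accepts generically via endswith guards (as bare labels after a dot)
-- GENERIC_SUFFIXES = {"gov", "gov.br", "jus.br", "leg.br", "mil.br"}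
--
--
-- def _is_official_domain(domain: str) -> bool:
--     # collect every suffix of the domain that starts right after a dot, once,
--     # then answer with pure set algebra: no endswith, no scan over candidates.
--     tails = {domain[i + 1:] for i, ch in enumerate(domain) if ch == "."}
--     return (domain in OFFICIAL_DOMAINS
--             or not tails.isdisjoint(GENERIC_SUFFIXES)
--             or not tails.isdisjoint(OFFICIAL_DOMAINS))
-- ===== Notes on version B (the rewrite author's own statement) =====
-- stated objective: alternative
-- what changed: Instead of A's guard-cascade of endswith tests plus an any() scan over all 24 candidates, B builds once the set of the domain's own after-a-dot suffixes in a single pass and answers with one exact membership test and two set-disjointness tests (against a generic-suffix set and OFFICIAL_DOMAINS); the empty-string guard disappears because the set algebra yields False there.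
import Mathlib
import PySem

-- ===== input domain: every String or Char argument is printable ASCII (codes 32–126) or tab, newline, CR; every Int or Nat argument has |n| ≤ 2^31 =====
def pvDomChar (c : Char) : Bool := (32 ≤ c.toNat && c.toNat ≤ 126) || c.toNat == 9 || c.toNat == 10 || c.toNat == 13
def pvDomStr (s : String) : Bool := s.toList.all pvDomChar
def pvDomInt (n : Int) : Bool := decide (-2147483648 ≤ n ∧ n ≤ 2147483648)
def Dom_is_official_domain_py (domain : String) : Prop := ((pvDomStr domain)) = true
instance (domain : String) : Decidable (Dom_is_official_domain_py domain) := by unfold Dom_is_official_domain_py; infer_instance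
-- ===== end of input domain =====

-- B replaces A's endswith guard-cascade + any() scan over the 24 candidates by building once the
-- set of the domain's own after-a-dot suffixes and answering with set membership/disjointness tests.

def OFFICIAL_DOMAINS : PySem.Set String := PySem.Set.ofList
  ["gov.br", "bcb.gov.br", "fazenda.gov.br", "planalto.gov.br", "in.gov.br", "ibge.gov.br",
   "saude.gov.br", "cvm.gov.br", "camara.leg.br", "senado.leg.br", "tse.jus.br", "stf.jus.br",
   "who.int", "whitehouse.gov", "treasury.gov", "sec.gov", "federalreserve.gov", "justice.gov",
   "cdc.gov", "fda.gov", "worldbank.org", "imf.org", "europa.eu", "ec.europa.eu"]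

-- ===== PORT A =====
def is_official_domain_py (domain : String) : Bool :=
  if domain == "" then false
  else if PySem.Str.endswith domain ".gov" || PySem.Str.endswith domain ".gov.br" then true
  else if PySem.Str.endswith domain ".jus.br" || PySem.Str.endswith domain ".leg.br"
          || PySem.Str.endswith domain ".mil.br" then true
  else OFFICIAL_DOMAINS.any
    (fun candidate => domain == candidate || PySem.Str.endswith domain ("." ++ candidate))

-- ===== PORT B =====
def GENERIC_SUFFIXES : PySem.Set String := PySem.Set.ofList
  ["gov", "gov.br", "jus.br", "leg.br", "mil.br"]

-- {domain[i+1:] for i, ch in enumerate(domain) if ch == "."}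
def pyDotTails (domain : String) : PySem.Set String :=
  PySem.Set.ofList
    (((PySem.List.enumerate domain.toList 0).filter (fun p => p.2 == '.')).map
      (fun p => PySem.Str.slice domain (some ((p.1 : Int) + 1)) none))

def is_official_domain_py_alt (domain : String) : Bool :=
  let tails := pyDotTails domain
  OFFICIAL_DOMAINS.contains domain
    || !(PySem.Set.isdisjoint tails GENERIC_SUFFIXES)
    || !(PySem.Set.isdisjoint tails OFFICIAL_DOMAINS)

-- ===== PRECONDITION & SPEC =====
def Spec_is_official_domain_py (domain : String) (out : Bool) : Prop := out = is_official_domain_py_alt domain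
instance (domain : String) (out : Bool) : Decidable (Spec_is_official_domain_py domain out) := by unfold Spec_is_official_domain_py; infer_instance

-- ===== CLAIM (what is proved, stated in full; the proofs are below) =====
def Claim_equal_is_official_domain_py : Prop := ∀ (domain : String), Dom_is_official_domain_py domain → Spec_is_official_domain_py domain (is_official_domain_py domain)

-- ===== LEMMAS AND PROOFS =====

theorem cons_suffix_iff_getElem {α : Type} (c : α) (t cs : List α) :
    (c :: t) <:+ cs ↔ ∃ j, cs[j]? = some c ∧ cs.drop (j+1) = t := by
  constructor
  · rintro ⟨pre, rfl⟩
    refine ⟨pre.length, ?_, ?_⟩ <;> simp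
  · rintro ⟨j, hj, rfl⟩
    have hlt : j < cs.length := (List.getElem?_eq_some_iff.mp hj).1
    have hc : cs[j] = c := by
      have := List.getElem?_eq_getElem hlt
      rw [hj] at this; exact (Option.some_inj.mp this.symm)
    have hdrop : cs.drop j = c :: cs.drop (j+1) := by
      rw [List.drop_eq_getElem_cons hlt, hc]
    rw [← hdrop]
    exact List.drop_suffix j cs

-- the slice domain[j+1:] is the character-list drop (j+1)
theorem slice_toList (s : String) (j : Nat) :
    (PySem.Str.slice s (some ((j:Int)+1)) none).toList = s.toList.drop (j+1) := by
  have h : ((j:Int)+1) = ((j+1 : Nat) : Int) := by push_cast; ring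
  rw [PySem.Str.toList_slice, PySem.Chars.slice_eq_listSlice, h, PySem.List.slice_from_natCast]

-- membership in the dot-tails set ⟺ the string ".c" is a suffix of the domain
theorem mem_dotTails_iff (domain c : String) :
    c ∈ pyDotTails domain ↔ PySem.Str.endswith domain ("." ++ c) = true := by
  have hdot : (("." : String).toList) = ['.'] := rfl
  rw [pyDotTails, PySem.Set.mem_ofList, PySem.Str.endswith_eq, PySem.Chars.endswith_iff,
      String.toList_append, hdot, List.singleton_append,
      cons_suffix_iff_getElem '.' c.toList domain.toList]
  simp only [List.mem_map, List.mem_filter, PySem.List.mem_enumerate_iff, beq_iff_eq]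
  constructor
  · rintro ⟨p, ⟨⟨k, hk, rfl⟩, hch⟩, rfl⟩
    simp only [zero_add] at hch ⊢
    refine ⟨k, ?_, ?_⟩
    · rw [List.getElem?_eq_getElem hk, hch]
    · rw [slice_toList]
  · rintro ⟨j, hj, hdrop⟩
    have hlt : j < domain.toList.length := (List.getElem?_eq_some_iff.mp hj).1
    have hch : domain.toList[j] = '.' := by
      have := List.getElem?_eq_getElem hlt
      rw [hj] at this; exact (Option.some_inj.mp this.symm)
    refine ⟨((0 : Int) + (j : Int), domain.toList[j]), ⟨⟨j, hlt, rfl⟩, hch⟩, ?_⟩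
    simp only [zero_add]
    rw [← String.toList_inj, slice_toList, hdrop]

-- B is true as soon as some member g of a set S has ".g" as a suffix of the domain
theorem alt_true_of_tail {S : PySem.Set String} (domain g : String)
    (hS : S = GENERIC_SUFFIXES ∨ S = OFFICIAL_DOMAINS)
    (hg : g ∈ S) (h : PySem.Str.endswith domain ("." ++ g) = true) :
    is_official_domain_py_alt domain = true := by
  have hmem : g ∈ pyDotTails domain := (mem_dotTails_iff domain g).mpr h
  have hnd : PySem.Set.isdisjoint (pyDotTails domain) S = false := by
    rw [← Bool.not_eq_true, PySem.Set.isdisjoint_iff]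
    push Not
    exact ⟨g, hmem, hg⟩
  rcases hS with rfl | rfl <;>
    simp [is_official_domain_py_alt, hnd]

theorem gov_append : ("." ++ "gov" : String) = ".gov" := rfl
theorem govbr_append : ("." ++ "gov.br" : String) = ".gov.br" := rfl
theorem jusbr_append : ("." ++ "jus.br" : String) = ".jus.br" := rfl
theorem legbr_append : ("." ++ "leg.br" : String) = ".leg.br" := rfl
theorem milbr_append : ("." ++ "mil.br" : String) = ".mil.br" := rfl

-- ===== VERDICT (by name: the statement is the Claim_ definition above) =====
theorem is_official_domain_py_spec : Claim_equal_is_official_domain_py := by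
  intro domain _
  unfold Spec_is_official_domain_py
  unfold is_official_domain_py
  split_ifs with h1 h2 h3
  · -- domain = ""
    have : domain = "" := by simpa using h1
    subst this; decide
  · -- .gov / .gov.br guard fired
    rcases Bool.or_eq_true_iff.mp h2 with h | h
    · exact (alt_true_of_tail domain "gov" (Or.inl rfl) (by decide) (gov_append ▸ h)).symm
    · exact (alt_true_of_tail domain "gov.br" (Or.inl rfl) (by decide) (govbr_append ▸ h)).symm
  · -- .jus.br / .leg.br / .mil.br guard fired
    rcases Bool.or_eq_true_iff.mp h3 with h | h
    · rcases Bool.or_eq_true_iff.mp h with h | h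
      · exact (alt_true_of_tail domain "jus.br" (Or.inl rfl) (by decide) (jusbr_append ▸ h)).symm
      · exact (alt_true_of_tail domain "leg.br" (Or.inl rfl) (by decide) (legbr_append ▸ h)).symm
    · exact (alt_true_of_tail domain "mil.br" (Or.inl rfl) (by decide) (milbr_append ▸ h)).symm
  · -- all guards false: A's scan ⟺ B's set algebra
    rw [Bool.eq_iff_iff]
    simp only [is_official_domain_py_alt, List.any_eq_true, Bool.or_eq_true, Bool.not_eq_true',
      beq_iff_eq, PySem.Set.contains_iff, ← Bool.not_eq_true, PySem.Set.isdisjoint_iff]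
    push Not
    constructor
    · rintro ⟨c, hc, rfl | hsuf⟩
      · exact Or.inl (Or.inl hc)
      · exact Or.inr ⟨c, (mem_dotTails_iff domain c).mpr hsuf, hc⟩
    · rintro ((hmem | ⟨g, hg, hgS⟩) | ⟨c, hc, hcS⟩)
      · exact ⟨domain, hmem, Or.inl rfl⟩
      · -- a generic tail would have fired a guard: contradiction with h2/h3
        exfalso
        have hsuf := (mem_dotTails_iff domain g).mp hg
        simp only [Bool.or_eq_true, not_or, Bool.not_eq_true] at h2 h3
        obtain ⟨hgov, hgovbr⟩ := h2
        obtain ⟨⟨hjus, hleg⟩, hmil⟩ := h3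
        simp only [GENERIC_SUFFIXES, PySem.Set.mem_ofList] at hgS
        fin_cases hgS
        · rw [gov_append, hgov] at hsuf; exact Bool.false_ne_true hsuf
        · rw [govbr_append, hgovbr] at hsuf; exact Bool.false_ne_true hsuf
        · rw [jusbr_append, hjus] at hsuf; exact Bool.false_ne_true hsuf
        · rw [legbr_append, hleg] at hsuf; exact Bool.false_ne_true hsuf
        · rw [milbr_append, hmil] at hsuf; exact Bool.false_ne_true hsuf
      · exact ⟨c, hcS, Or.inr ((mem_dotTails_iff domain c).mp hc)⟩
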